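-- pv_equiv track=rewrite | github.com/miguelEq/Estructuras-de-Datos | listas/zipMaximos.py | zipMaximos
-- ===== SOURCE A (Python) =====
-- def zipMaximos(ls1,ls2):
--     if(ls1 == []):
--         return ls2
--     elif(ls2 == []):
--         return ls1
--     elif(ls1[0] > ls2[0]):
--         return [ls1[0]] + zipMaximos(ls1[1:],ls2[1:])
--     else:
--         return [ls2[0]] + zipMaximos(ls1[1:],ls2[1:])
-- ===== SOURCE B (Python) =====
-- def zipMaximos(ls1, ls2):
--     if ls1 == []:
--         return ls2
--     if ls2 == []:
--         return ls1
--     n = min(len(ls1), len(ls2))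
--     res = [ls1[i] if ls1[i] > ls2[i] else ls2[i] for i in range(n)]
--     res.extend(ls1[n:] if len(ls1) > n else ls2[n:])
--     return res
-- ===== Notes on version B (the rewrite author's own statement) =====
-- stated objective: faster
-- what changed: replaces A's head/tail recursion (a fresh list slice and concatenation per element, quadratic copying) with a single iterative index pass building the zipped maxima and then extending with the longer tail once
import Mathlib
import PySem

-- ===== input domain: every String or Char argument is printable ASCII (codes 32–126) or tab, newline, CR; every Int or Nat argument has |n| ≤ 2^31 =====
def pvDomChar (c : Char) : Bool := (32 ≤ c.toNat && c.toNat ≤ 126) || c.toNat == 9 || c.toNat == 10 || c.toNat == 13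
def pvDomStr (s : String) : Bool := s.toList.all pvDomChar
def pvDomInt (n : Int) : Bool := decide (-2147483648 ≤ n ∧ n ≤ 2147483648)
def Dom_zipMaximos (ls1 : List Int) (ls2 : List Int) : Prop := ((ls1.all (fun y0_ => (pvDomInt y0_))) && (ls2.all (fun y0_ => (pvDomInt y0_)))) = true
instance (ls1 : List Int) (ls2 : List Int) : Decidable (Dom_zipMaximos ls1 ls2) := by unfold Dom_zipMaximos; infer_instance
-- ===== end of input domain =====

-- B replaces A's slice-per-step recursion (quadratic copying) with one linear indexed pass; proved equal on all inputs.
-- ===== PORT A =====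
-- A: recursion on the heads; ls1[0]/ls1[1:] ported via cons pattern (exact for non-empty lists)
def zipMaximos : (ls1 : List Int) → (ls2 : List Int) → List Int
  | [], ls2 => ls2
  | ls1, [] => ls1
  | a :: t1, b :: t2 =>
    if a > b then [a] ++ zipMaximos t1 t2 else [b] ++ zipMaximos t1 t2

-- ===== PORT B =====
-- B: one flat indexed pass over range(n), n = min of the lengths, then the longer tail;
-- ls1[i] with 0 ≤ i < len ported as getD i 0 (in range on every reached index), ls1[n:] as drop n
def zipMaximos_alt (ls1 : List Int) (ls2 : List Int) : List Int :=
  if ls1 = [] then ls2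
  else if ls2 = [] then ls1
  else
    let n := min ls1.length ls2.length
    let res := (List.range n).map (fun i =>
      if ls1.getD i 0 > ls2.getD i 0 then ls1.getD i 0 else ls2.getD i 0)
    res ++ (if ls1.length > n then ls1.drop n else ls2.drop n)

-- ===== PRECONDITION & SPEC =====
def Spec_zipMaximos (ls1 : List Int) (ls2 : List Int) (out : List Int) : Prop := out = zipMaximos_alt ls1 ls2
instance (ls1 : List Int) (ls2 : List Int) (out : List Int) : Decidable (Spec_zipMaximos ls1 ls2 out) := by unfold Spec_zipMaximos; infer_instance

-- ===== CLAIM (what is proved, stated in full; the proofs are below) =====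
def Claim_equal_zipMaximos : Prop := ∀ (ls1 : List Int) (ls2 : List Int), Dom_zipMaximos ls1 ls2 → Spec_zipMaximos ls1 ls2 (zipMaximos ls1 ls2)

-- ===== LEMMAS AND PROOFS =====

-- ===== VERDICT (by name: the statement is the Claim_ definition above) =====
-- canonical form shared by both ports
def zipCanon (ls1 ls2 : List Int) : List Int :=
  (List.range (min ls1.length ls2.length)).map (fun i =>
      if ls1.getD i 0 > ls2.getD i 0 then ls1.getD i 0 else ls2.getD i 0)
    ++ (if ls1.length > min ls1.length ls2.length
        then ls1.drop (min ls1.length ls2.length)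
        else ls2.drop (min ls1.length ls2.length))

lemma zipMaximos_eq_canon : ∀ (ls1 ls2 : List Int), zipMaximos ls1 ls2 = zipCanon ls1 ls2 := by
  intro ls1
  induction ls1 with
  | nil => intro ls2; simp [zipMaximos, zipCanon]
  | cons a t1 ih =>
    intro ls2
    cases ls2 with
    | nil => simp [zipMaximos, zipCanon]
    | cons b t2 =>
      have h := ih t2
      simp only [zipMaximos, zipCanon] at h ⊢
      simp only [List.length_cons, Nat.succ_min_succ, List.range_succ_eq_map, List.map_cons,
        List.map_map, List.getD_cons_zero, List.drop_succ_cons, Nat.succ_lt_succ_iff]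
      by_cases hab : a > b <;> simp [hab, h]

lemma zipMaximos_alt_eq_canon : ∀ (ls1 ls2 : List Int), zipMaximos_alt ls1 ls2 = zipCanon ls1 ls2 := by
  intro ls1 ls2
  unfold zipMaximos_alt zipCanon
  by_cases h1 : ls1 = []
  · subst h1; simp
  · by_cases h2 : ls2 = []
    · subst h2
      simp [h1, List.length_pos_iff.mpr h1]
    · simp [h1, h2]

theorem zipMaximos_spec : Claim_equal_zipMaximos := by
  intro ls1 ls2 _
  unfold Spec_zipMaximos
  rw [zipMaximos_eq_canon, zipMaximos_alt_eq_canon]
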